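-- pv_equiv track=rewrite | github.com/0x12th/leetcode-and-others | yandex-tasks/xy_distance.py | min_distance_xy
-- ===== SOURCE A (Python) =====
-- def min_distance_xy(s: str) -> int:
--     res = len_s = len(s)
--     last_pos, last_ch = -1, ""
--
--     for i in range(len_s):
--         ch = s[i]
--         if ch == "0":
--             continue
--         if last_pos != -1 and ch != last_ch:
--             dist = i - last_pos
--             if dist < res:
--                 if dist == 1:
--                     return 1
--                 res = dist
--         last_pos, last_ch = i, ch
--
--     return 0 if res == len_s else res
-- ===== SOURCE B (Python) =====
-- def min_distance_xy(s: str) -> int: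
--     # Divide and conquer: each segment yields (best gap or None,
--     # first non-zero (i, ch) or None, last non-zero (i, ch) or None);
--     # merging adds the cross-boundary gap when the touching chars differ.
--     def solve(lo, hi):
--         if hi - lo == 0:
--             return (None, None, None)
--         if hi - lo == 1:
--             ch = s[lo]
--             if ch == "0":
--                 return (None, None, None)
--             return (None, (lo, ch), (lo, ch))
--         mid = (lo + hi) // 2
--         bl, fl, ll = solve(lo, mid)
--         br, fr, rr = solve(mid, hi)
--         cands = [x for x in (bl, br) if x is not None]
--         if ll is not None and fr is not None and ll[1] != fr[1]:
--             cands.append(fr[0] - ll[0])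
--         best = min(cands) if cands else None
--         return (best, fl if fl is not None else fr, rr if rr is not None else ll)
--
--     best, _, _ = solve(0, len(s))
--     return best if best is not None else 0
-- ===== Notes on version B (the rewrite author's own statement) =====
-- stated objective: alternative
-- what changed: Replaces A's single stateful left-to-right scan (last_pos/last_ch/res with early return) with a divide-and-conquer recursion: each half returns (best gap, first non-zero, last non-zero) and merging adds the cross-boundary gap when the touching non-zero chars differ.
import Mathlib
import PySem

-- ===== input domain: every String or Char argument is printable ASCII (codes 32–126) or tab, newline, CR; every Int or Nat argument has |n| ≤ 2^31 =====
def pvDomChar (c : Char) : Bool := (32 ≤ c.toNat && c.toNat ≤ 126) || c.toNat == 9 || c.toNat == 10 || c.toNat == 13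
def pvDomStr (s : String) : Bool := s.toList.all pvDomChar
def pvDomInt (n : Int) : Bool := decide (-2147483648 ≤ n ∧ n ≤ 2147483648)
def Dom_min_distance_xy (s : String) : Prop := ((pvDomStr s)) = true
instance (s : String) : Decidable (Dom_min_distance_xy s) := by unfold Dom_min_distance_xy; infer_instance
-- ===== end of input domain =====

-- B replaces A's stateful scan with a divide-and-conquer recursion (objective: alternative).

-- ===== PORT A =====
-- A's for-loop over range(len_s), transliterated as structural recursion over the
-- character list with the loop state (i, res, last_pos, last_ch); the early
-- `return 1` is the literal 1 in the dist = 1 branch.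
def mdLoopA : List Char → Int → Int → Int → String → Int → Int
  | [], _, res, _, _, len_s => if res = len_s then 0 else res
  | c :: rest, i, res, last_pos, last_ch, len_s =>
    let ch := String.ofList [c]
    if ch = "0" then mdLoopA rest (i + 1) res last_pos last_ch len_s
    else if last_pos ≠ -1 ∧ ch ≠ last_ch then
      let dist := i - last_pos
      if dist < res then
        if dist = 1 then 1
        else mdLoopA rest (i + 1) dist i ch len_s
      else mdLoopA rest (i + 1) res i ch len_s
    else mdLoopA rest (i + 1) res i ch len_s

def min_distance_xy (s : String) : Int :=
  let cs := s.toList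
  mdLoopA cs 0 (cs.length : Int) (-1) "" (cs.length : Int)

-- ===== PORT B =====
-- Source B's `cands.append(fr[0]-ll[0])` step: the optional cross-boundary gap.
def pvCross (ll fr : Option (Int × Char)) : List Int :=
  match ll, fr with
  | some l, some f => if l.2 ≠ f.2 then [f.1 - l.1] else []
  | _, _ => []

-- Source B's inner `solve(lo, hi)`: (best or None, first non-zero, last non-zero).
-- The first guard is `hi - lo ≤ 0` (Python writes == 0) purely as a totality
-- guard: every call reachable from the top level has lo ≤ hi.
def solveB (cs : List Char) (lo hi : Int) : Option Int × Option (Int × Char) × Option (Int × Char) :=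
  if _h0 : hi - lo ≤ 0 then (none, none, none)
  else if _h1 : hi - lo = 1 then
    match PySem.List.pyGet? cs lo with
    | none => (none, none, none)  -- unreachable: top-level calls keep lo in range
    | some ch => if ch = '0' then (none, none, none) else (none, some (lo, ch), some (lo, ch))
  else
    let mid := PySem.Int.floordiv (lo + hi) 2
    let L := solveB cs lo mid
    let R := solveB cs mid hi
    let cands := L.1.toList ++ R.1.toList ++ pvCross L.2.2 R.2.1
    (PySem.List.min? cands (fun x => x),
     L.2.1.or R.2.1,   -- `fl if fl is not None else fr`
     R.2.2.or L.2.2)   -- `rr if rr is not None else ll`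
termination_by (hi - lo).toNat
decreasing_by
  · have hm := PySem.Int.floordiv_eq_ediv_of_pos (a := lo + hi) (b := 2) (by omega)
    simp only [hm] at *; omega
  · have hm := PySem.Int.floordiv_eq_ediv_of_pos (a := lo + hi) (b := 2) (by omega)
    simp only [hm] at *; omega

def min_distance_xy_alt (s : String) : Int :=
  match (solveB s.toList 0 (s.toList.length : Int)).1 with
  | some b => b
  | none => 0

-- ===== PRECONDITION & SPEC =====
def Spec_min_distance_xy (s : String) (out : Int) : Prop := out = min_distance_xy_alt s
instance (s : String) (out : Int) : Decidable (Spec_min_distance_xy s out) := by unfold Spec_min_distance_xy; infer_instance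

-- ===== CLAIM (what is proved, stated in full; the proofs are below) =====
def Claim_equal_min_distance_xy : Prop := ∀ (s : String), Dom_min_distance_xy s → Spec_min_distance_xy s (min_distance_xy s)

-- ===== LEMMAS AND PROOFS =====

-- the indexed non-'0' characters of cs, positions starting at j
def nzFrom : Int → List Char → List (Int × Char)
  | _, [] => []
  | j, c :: cs => if c ≠ '0' then (j, c) :: nzFrom (j + 1) cs else nzFrom (j + 1) cs

-- the adjacent-differing gaps, given the previous non-'0' pair (if any)
def gaps : Option (Int × Char) → List (Int × Char) → List Int
  | _, [] => []
  | none, p :: ps => gaps (some p) ps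
  | some a, b :: ps => (if a.2 ≠ b.2 then [b.1 - a.1] else []) ++ gaps (some b) ps

-- min of a list as an Option (none on the empty list)
def omin : List Int → Option Int
  | [] => none
  | x :: t => some (t.foldl min x)

def omerge : Option Int → Option Int → Option Int
  | none, b => b
  | some a, none => some a
  | some a, some b => some (min a b)

theorem nzFrom_cons_ne (j : Int) (c : Char) (cs : List Char) (h : ¬ c = '0') :
    nzFrom j (c :: cs) = (j, c) :: nzFrom (j + 1) cs := by
  simp only [nzFrom]; rw [if_pos h]

theorem nzFrom_cons_eq (j : Int) (cs : List Char) :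
    nzFrom j ('0' :: cs) = nzFrom (j + 1) cs := by
  simp only [nzFrom]; rw [if_neg (by simp)]

theorem nzFrom_append (l r : List Char) (j : Int) :
    nzFrom j (l ++ r) = nzFrom j l ++ nzFrom (j + l.length) r := by
  induction l generalizing j with
  | nil => simp [nzFrom]
  | cons c t ih =>
    by_cases h : c = '0'
    · subst h
      rw [List.cons_append, nzFrom_cons_eq, nzFrom_cons_eq, ih]
      congr 2
      simp only [List.length_cons]; push_cast; ring
    · rw [List.cons_append, nzFrom_cons_ne _ _ _ h, nzFrom_cons_ne _ _ _ h, ih]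
      simp only [List.cons_append]
      congr 3
      simp only [List.length_cons]; push_cast; ring

-- the previous-pair state after traversing u
def lastO (prev : Option (Int × Char)) (u : List (Int × Char)) : Option (Int × Char) :=
  match u.getLast? with
  | some x => some x
  | none => prev

theorem gaps_append (u v : List (Int × Char)) (prev : Option (Int × Char)) :
    gaps prev (u ++ v) = gaps prev u ++ gaps (lastO prev u) v := by
  induction u generalizing prev with
  | nil => simp [gaps, lastO]
  | cons a t ih =>
    have hlast : lastO prev (a :: t) = lastO (some a) t := by
      cases t with
      | nil => simp [lastO]
      | cons b tt =>
        simp only [lastO, List.getLast?_cons_cons]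
        cases h : (b :: tt).getLast? with
        | none => simp at h
        | some x => rfl
    cases prev with
    | none =>
      simp only [List.cons_append, gaps, hlast]
      exact ih (some a)
    | some x =>
      simp only [List.cons_append, gaps, hlast, ih (some a), List.append_assoc]

theorem gaps_some_eq_cross (a : Int × Char) (v : List (Int × Char)) :
    gaps (some a) v = pvCross (some a) v.head? ++ gaps none v := by
  cases v with
  | nil => simp [gaps, pvCross]
  | cons b ps => simp [gaps, pvCross]

theorem omin_append (l1 l2 : List Int) : omin (l1 ++ l2) = omerge (omin l1) (omin l2) := by
  cases l1 with
  | nil => simp [omin, omerge]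
  | cons x t =>
    cases l2 with
    | nil => simp [omin, omerge]
    | cons y u =>
      simp only [List.cons_append, omin, omerge, List.foldl_append, List.foldl_cons]
      congr 1
      rw [List.foldl_assoc]

theorem omerge_assoc (a b c : Option Int) : omerge (omerge a b) c = omerge a (omerge b c) := by
  cases a <;> cases b <;> cases c <;> simp [omerge, min_assoc]

theorem omerge_comm (a b : Option Int) : omerge a b = omerge b a := by
  cases a <;> cases b <;> simp [omerge, min_comm]

theorem omin_toList (a : Option Int) : omin a.toList = a := by
  cases a <;> simp [omin]

theorem head_merge {α : Type} (L1 L2 : List α) :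
    L1.head?.or L2.head? = (L1 ++ L2).head? := by
  cases L1 <;> simp

theorem last_merge {α : Type} (L1 L2 : List α) :
    L2.getLast?.or L1.getLast? = (L1 ++ L2).getLast? := by
  cases h : L2.getLast? with
  | none => simp [List.getLast?_eq_none_iff.mp h]
  | some p =>
    have hne : L2 ≠ [] := by intro hnil; rw [hnil] at h; simp at h
    rw [List.getLast?_append_of_ne_nil _ hne, h]
    rfl

-- CHARACTERIZATION of B's solve: on an in-range segment it returns the minimum
-- gap, the first and the last non-zero pair of that segment.
theorem solveB_eq_aux (cs : List Char) (n : Nat) : ∀ (lo hi : Int),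
    0 ≤ lo → lo ≤ hi → hi ≤ cs.length → (hi - lo).toNat = n →
    solveB cs lo hi =
      (omin (gaps none (nzFrom lo ((cs.drop lo.toNat).take (hi - lo).toNat))),
       (nzFrom lo ((cs.drop lo.toNat).take (hi - lo).toNat)).head?,
       (nzFrom lo ((cs.drop lo.toNat).take (hi - lo).toNat)).getLast?) := by
  induction n using Nat.strong_induction_on with
  | _ n ih =>
    intro lo hi h0 hle hhi hfuel
    rw [solveB]
    by_cases hz : hi - lo ≤ 0
    · rw [dif_pos hz]
      have hd : (hi - lo).toNat = 0 := by omega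
      rw [hd]
      simp [nzFrom, gaps, omin]
    · rw [dif_neg hz]
      by_cases h1 : hi - lo = 1
      · rw [dif_pos h1]
        have hlt : lo.toNat < cs.length := by omega
        have hget : PySem.List.pyGet? cs lo = some (cs[lo.toNat]'hlt) := by
          simp only [PySem.List.pyGet?, PySem.List.pyIdx?]
          rw [if_pos h0, if_pos (by omega : lo < (cs.length : Int))]
          simp [List.getElem?_eq_getElem hlt]
        have hseg : (cs.drop lo.toNat).take (hi - lo).toNat = [cs[lo.toNat]'hlt] := by
          have h1n : (hi - lo).toNat = 1 := by omega
          rw [h1n, List.take_one, List.head?_drop, List.getElem?_eq_getElem hlt]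
          rfl
        rw [hget, hseg]
        dsimp only
        by_cases hc : cs[lo.toNat]'hlt = '0'
        · rw [if_pos hc, hc, nzFrom_cons_eq]
          simp [nzFrom, gaps, omin]
        · rw [if_neg hc, nzFrom_cons_ne _ _ _ hc]
          simp [nzFrom, gaps, omin]
      · rw [dif_neg h1]
        dsimp only
        have h2 : 2 ≤ hi - lo := by omega
        have hmid := PySem.Int.floordiv_eq_ediv_of_pos (a := lo + hi) (b := 2) (by omega)
        set mid := PySem.Int.floordiv (lo + hi) 2 with hmiddef
        have hb1 : lo < mid := by rw [hmid]; omega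
        have hb2 : mid < hi := by rw [hmid]; omega
        have hL := ih (mid - lo).toNat (by omega) lo mid h0 (by omega) (by omega) rfl
        have hR := ih (hi - mid).toNat (by omega) mid hi (by omega) (by omega) hhi rfl
        rw [hL, hR]
        -- the segment splits at mid
        have hsplit : (cs.drop lo.toNat).take (hi - lo).toNat =
            (cs.drop lo.toNat).take (mid - lo).toNat ++ (cs.drop mid.toNat).take (hi - mid).toNat := by
          have hdd : cs.drop mid.toNat = (cs.drop lo.toNat).drop (mid - lo).toNat := by
            rw [List.drop_drop]; congr 1; omega
          rw [hdd, ← List.take_add]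
          congr 1; omega
        have hlen1 : (((cs.drop lo.toNat).take (mid - lo).toNat).length : Int) = mid - lo := by
          simp [List.length_take, List.length_drop]
          omega
        set segL := (cs.drop lo.toNat).take (mid - lo).toNat with hsegL
        set segR := (cs.drop mid.toNat).take (hi - mid).toNat with hsegR
        have hnz : nzFrom lo ((cs.drop lo.toNat).take (hi - lo).toNat) =
            nzFrom lo segL ++ nzFrom mid segR := by
          rw [hsplit, nzFrom_append, hlen1]
          congr 2
          omega
        rw [hnz]
        set L1 := nzFrom lo segL
        set L2 := nzFrom mid segR
        refine Prod.ext ?_ (Prod.ext ?_ ?_)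
        · -- best component
          show PySem.List.min? ((omin (gaps none L1)).toList ++ (omin (gaps none L2)).toList
              ++ pvCross L1.getLast? L2.head?) (fun x => x) = omin (gaps none (L1 ++ L2))
          have hmin? : ∀ l : List Int, PySem.List.min? l (fun x => x) = omin l := by
            intro l
            cases l with
            | nil => simp [omin, PySem.List.min?]
            | cons x t => rw [PySem.List.min?_id_cons]; rfl
          rw [hmin?]
          rw [gaps_append, omin_append, omin_append, omin_append,
            omin_toList, omin_toList]
          have hcross : gaps (lastO none L1) L2 = pvCross L1.getLast? L2.head? ++ gaps none L2 := by
            cases hl : L1.getLast? with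
            | none => simp [lastO, hl, pvCross]
            | some a => rw [lastO, hl, gaps_some_eq_cross]
          rw [hcross, omin_append]
          rw [omerge_assoc]
          congr 1
          rw [omerge_comm]
        · -- head component
          exact head_merge L1 L2
        · -- last component
          exact last_merge L1 L2

theorem solveB_eq (cs : List Char) (lo hi : Int)
    (h0 : 0 ≤ lo) (hle : lo ≤ hi) (hhi : hi ≤ cs.length) :
    solveB cs lo hi =
      (omin (gaps none (nzFrom lo ((cs.drop lo.toNat).take (hi - lo).toNat))),
       (nzFrom lo ((cs.drop lo.toNat).take (hi - lo).toNat)).head?,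
       (nzFrom lo ((cs.drop lo.toNat).take (hi - lo).toNat)).getLast?) :=
  solveB_eq_aux cs (hi - lo).toNat lo hi h0 hle hhi rfl

theorem foldl_min_of_le (l : List Int) (a : Int) (h : ∀ x ∈ l, a ≤ x) :
    l.foldl min a = a := by
  induction l generalizing a with
  | nil => rfl
  | cons x t ih =>
    have hax : a ≤ x := h x (by simp)
    simp only [List.foldl_cons, min_eq_left hax]
    exact ih a (fun y hy => h y (by simp [hy]))

theorem gaps_some_bounds (cs : List Char) (j : Int) (a : Int × Char) (L : Int)
    (h0 : 0 ≤ a.1) (hlt : a.1 < j) (hL : j + cs.length ≤ L) :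
    ∀ d ∈ gaps (some a) (nzFrom j cs), 1 ≤ d ∧ d < L := by
  induction cs generalizing j a with
  | nil => simp [nzFrom, gaps]
  | cons c rest ih =>
    have hlen : (j : Int) + 1 + rest.length ≤ L := by simp at hL; omega
    by_cases h : c = '0'
    · subst h
      rw [nzFrom_cons_eq]
      exact ih (j + 1) a h0 (by omega) hlen
    · rw [nzFrom_cons_ne j c rest h]
      simp only [gaps, List.mem_append]
      intro d hd
      rcases hd with hd | hd
      · have hdj : d = j - a.1 := by
          by_cases hab : a.2 = c
          · rw [if_neg (by simp [hab])] at hd; simp at hd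
          · rw [if_pos (by simp [hab])] at hd; simpa using hd
        constructor <;> omega
      · exact ih (j + 1) (j, c) (by omega) (by omega) hlen d hd

theorem gaps_none_bounds (cs : List Char) (j L : Int)
    (h0 : 0 ≤ j) (hL : j + cs.length ≤ L) :
    ∀ d ∈ gaps none (nzFrom j cs), 1 ≤ d ∧ d < L := by
  induction cs generalizing j with
  | nil => simp [nzFrom, gaps]
  | cons c rest ih =>
    have hlen : (j : Int) + 1 + rest.length ≤ L := by simp at hL; omega
    by_cases h : c = '0'
    · subst h
      rw [nzFrom_cons_eq]
      exact ih (j + 1) (by omega) hlen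
    · rw [nzFrom_cons_ne j c rest h]
      simp only [gaps]
      exact gaps_some_bounds rest (j + 1) (j, c) L h0 (by omega) hlen

theorem ofList_single_inj (c c' : Char) :
    String.ofList [c] = String.ofList [c'] ↔ c = c' := by
  constructor
  · intro h
    have := congrArg String.toList h
    simpa using this
  · intro h; rw [h]

-- loop invariant: A's loop equals "fold min over the remaining gaps, then finalize"
theorem mdLoopA_eq (cs : List Char) (i res last_pos : Int) (last_ch : String)
    (last : Option (Int × Char)) (len_s : Int)
    (hi : 0 ≤ i) (hlen : i + cs.length = len_s)
    (hlast : (last = none ∧ last_pos = -1) ∨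
      (∃ p c', last = some (p, c') ∧ last_pos = p ∧ last_ch = String.ofList [c'] ∧ 0 ≤ p ∧ p < i)) :
    mdLoopA cs i res last_pos last_ch len_s =
      (if (gaps last (nzFrom i cs)).foldl min res = len_s then 0
       else (gaps last (nzFrom i cs)).foldl min res) := by
  induction cs generalizing i res last_pos last_ch last with
  | nil => simp [mdLoopA, nzFrom, gaps]
  | cons c rest ih =>
    have hlen' : (i + 1) + (rest.length : Int) = len_s := by simp at hlen; omega
    simp only [mdLoopA]
    by_cases hc : c = '0'
    · -- continue branch
      rw [if_pos (by rw [hc])]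
      rw [hc, nzFrom_cons_eq]
      refine ih (i + 1) res last_pos last_ch last (by omega) hlen' ?_
      rcases hlast with h | ⟨p, c', h1, h2, h3, h4, h5⟩
      · exact Or.inl h
      · exact Or.inr ⟨p, c', h1, h2, h3, h4, by omega⟩
    · rw [if_neg (fun h => hc ((ofList_single_inj c '0').mp h)), nzFrom_cons_ne i c rest hc]
      rcases hlast with ⟨hl, hp⟩ | ⟨p, c', h1, h2, h3, h4, h5⟩
      · -- first non-zero char: last_pos = -1, condition is False
        have hcond : ¬ (last_pos ≠ -1 ∧ String.ofList [c] ≠ last_ch) := by simp [hp]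
        rw [if_neg hcond, hl]
        simp only [gaps]
        exact ih (i + 1) res i (String.ofList [c]) (some (i, c)) (by omega) hlen'
          (Or.inr ⟨i, c, rfl, rfl, rfl, hi, by omega⟩)
      · rw [h1]
        simp only [gaps]
        by_cases heq : c = c'
        · -- same char: no gap, condition False
          have hcond : ¬ (last_pos ≠ -1 ∧ String.ofList [c] ≠ last_ch) := by
            rintro ⟨-, hne⟩; exact hne (by rw [h3, (ofList_single_inj c c').mpr heq])
          have hgap : ¬ (c' ≠ c) := by simp [heq]
          rw [if_neg hcond, if_neg hgap, List.nil_append]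
          exact ih (i + 1) res i (String.ofList [c]) (some (i, c)) (by omega) hlen'
            (Or.inr ⟨i, c, rfl, rfl, rfl, by omega, by omega⟩)
        · have hcond : last_pos ≠ -1 ∧ String.ofList [c] ≠ last_ch :=
            ⟨by omega, by rw [h3]; exact fun h => heq ((ofList_single_inj c c').mp h)⟩
          have hgap : c' ≠ c := fun h => heq h.symm
          rw [if_pos hcond, if_pos hgap, List.singleton_append, List.foldl_cons, h2]
          by_cases hdlt : i - p < res
          · by_cases hd1 : i - p = 1
            · -- early return 1
              rw [if_pos hdlt, if_pos hd1]
              have hbnd := gaps_some_bounds rest (i + 1) (i, c) len_s (by omega) (by omega)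
                (by omega)
              have hmin : min res (i - p) = 1 := by rw [hd1] at hdlt ⊢; omega
              rw [hmin, foldl_min_of_le _ 1 (fun x hx => (hbnd x hx).1)]
              have h1len : ¬ (1 : Int) = len_s := by
                have : (0 : Int) ≤ rest.length := by positivity
                omega
              rw [if_neg h1len]
            · rw [if_pos hdlt, if_neg hd1]
              have hmin : min res (i - p) = i - p := by omega
              rw [hmin]
              exact ih (i + 1) (i - p) i (String.ofList [c]) (some (i, c)) (by omega) hlen'
                (Or.inr ⟨i, c, rfl, rfl, rfl, by omega, by omega⟩)
          · rw [if_neg hdlt]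
            have hmin : min res (i - p) = res := by omega
            rw [hmin]
            exact ih (i + 1) res i (String.ofList [c]) (some (i, c)) (by omega) hlen'
              (Or.inr ⟨i, c, rfl, rfl, rfl, by omega, by omega⟩)

-- ===== VERDICT (by name: the statement is the Claim_ definition above) =====
theorem min_distance_xy_spec : Claim_equal_min_distance_xy := by
  intro s _
  unfold Spec_min_distance_xy
  dsimp only [min_distance_xy, min_distance_xy_alt]
  rw [solveB_eq s.toList 0 (s.toList.length : Int) le_rfl (by positivity) le_rfl]
  have hseg : (s.toList.drop (0 : Int).toNat).take (((s.toList.length : Int) - 0)).toNat = s.toList := by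
    simp
  rw [hseg]
  rw [mdLoopA_eq s.toList 0 (s.toList.length) (-1) "" none (s.toList.length)
    le_rfl (by simp) (Or.inl ⟨rfl, rfl⟩)]
  have hbnd := gaps_none_bounds s.toList 0 (s.toList.length) le_rfl (by simp)
  cases hg : gaps none (nzFrom 0 s.toList) with
  | nil => simp [omin]
  | cons d t =>
    simp only [omin]
    have hd : 1 ≤ d ∧ d < s.toList.length := hbnd d (by rw [hg]; simp)
    have hmind : min ((s.toList.length : Int)) d = d := by omega
    simp only [List.foldl_cons, hmind]
    have hle : t.foldl min d ≤ d := (PySem.List.foldl_min_le t d).1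
    have hne : ¬ t.foldl min d = (s.toList.length : Int) := by omega
    rw [if_neg hne]
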